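-- pv_equiv track=rewrite | github.com/Azure/gpt-rag-ingestion | chunking/chunkers/multimodal_chunker.py | _replace_figures_in_sequence
-- ===== SOURCE A (Python) =====
-- def _replace_figures_in_sequence(content, figures):
--     """
--     Replace all occurrences of <figure>...</figure> with <figure{id}> in the order
--     of the figures list. If we run out of <figure> tags or figures, we stop.
--
--     Args:
--         content (str): The document content containing figure tags.
--         figures (list): A list of figure dictionaries with 'id' keys.
--
--     Returns:
--         str: The updated content with figure tags replaced by identifiers.
--     """
--     for fig in figures:
--         figure_id = fig.get("id")
--         if not figure_id:
--             continue
--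
--         start_index = content.find("<figure>")
--         if start_index == -1:
--             break  # no more <figure> tags
--
--         end_index = content.find("</figure>", start_index)
--         if end_index == -1:
--             break  # malformed or missing closing </figure>
--
--         # Replace everything from <figure> to </figure> with <figure{id}>
--         content = (
--             content[:start_index]
--             + f"<figure{figure_id}>"
--             + content[end_index + len("</figure>"):]
--         )
--
--     return content
-- ===== SOURCE B (Python) =====
-- def _replace_figures_in_sequence(content, figures):
--     # Recursive partition-based rewrite: ids are prefiltered once, then each step
--     # splits the pending tail around the first <figure>...</figure> pair with
--     # str.partition (no index arithmetic) and assembles the result back-to-front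
--     # as the recursion returns.
--     ids = [f.get("id") for f in figures if f.get("id")]
--
--     def go(rest, ids):
--         if not ids:
--             return rest
--         pre, sep, after = rest.partition("<figure>")
--         if not sep:
--             return rest
--         _body, sep2, tail = after.partition("</figure>")
--         if not sep2:
--             return rest
--         return pre + go("<figure" + ids[0] + ">" + tail, ids[1:])
--
--     return go(content, ids)
-- ===== Notes on version B (the rewrite author's own statement) =====
-- stated objective: alternative
-- what changed: B prefilters the figure ids into a list once, then recursively partitions the pending tail around the first <figure>...</figure> pair (str.partition, no index arithmetic into the whole document) and assembles the result back-to-front as the recursion returns, instead of A's rebuild-the-whole-string-and-rescan-from-index-0 loop.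
import Mathlib
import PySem

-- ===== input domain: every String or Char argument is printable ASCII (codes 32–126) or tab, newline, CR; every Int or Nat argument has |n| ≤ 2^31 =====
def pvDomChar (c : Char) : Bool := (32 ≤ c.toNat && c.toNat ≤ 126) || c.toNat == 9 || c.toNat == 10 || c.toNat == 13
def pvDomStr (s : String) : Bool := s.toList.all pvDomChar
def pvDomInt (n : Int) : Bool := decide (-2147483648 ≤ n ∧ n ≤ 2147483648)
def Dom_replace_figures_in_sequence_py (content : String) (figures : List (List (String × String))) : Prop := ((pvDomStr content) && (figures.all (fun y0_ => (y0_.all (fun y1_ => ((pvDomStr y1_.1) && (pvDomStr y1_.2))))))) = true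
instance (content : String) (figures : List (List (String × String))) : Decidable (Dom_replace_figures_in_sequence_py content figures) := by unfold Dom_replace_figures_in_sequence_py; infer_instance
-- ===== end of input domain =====

-- B prefilters the figure ids once and then recursively splits the pending tail
-- around the first <figure>...</figure> pair partition-style (no index arithmetic
-- into the whole document), assembling the result back-to-front as the recursion
-- returns; equal return value on every input (alternative decomposition).

-- ===== PORT A =====
def replace_figures_in_sequence_py_loop (content : List Char) : List (List (String × String)) → List Char
  | [] => content
  | fig :: figs =>
    let figure_id := ((PySem.Dict.mk fig).get? "id").getD ""
    if figure_id = "" then replace_figures_in_sequence_py_loop content figs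
    else
      let start_index := PySem.Chars.find content "<figure>".toList
      if start_index = -1 then content
      else
        let end_index := PySem.Chars.findFrom content "</figure>".toList start_index none
        if end_index = -1 then content
        else
          replace_figures_in_sequence_py_loop
            (PySem.List.slice content none (some start_index)
              ++ ("<figure".toList ++ figure_id.toList ++ ">".toList)
              ++ PySem.List.slice content (some (end_index + 9)) none) figs

def replace_figures_in_sequence_py (content : String) (figures : List (List (String × String))) : String :=
  String.ofList (replace_figures_in_sequence_py_loop content.toList figures)

-- ===== PORT B =====
-- ids = [f.get("id") for f in figures if f.get("id")]
def pv_ids (figures : List (List (String × String))) : List String :=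
  figures.filterMap (fun fig =>
    match (PySem.Dict.mk fig).get? "id" with
    | none => none
    | some i => if i = "" then none else some i)

-- go(rest, ids); rest.partition(sep) is ported by hand as
-- (take at the first hit, hit?, drop past the hit) — exact for a found/absent separator
def pv_go (rest : List Char) : List String → List Char
  | [] => rest
  | fid :: ids =>
    let i := PySem.Chars.find rest "<figure>".toList
    if i = -1 then rest          -- partition found no separator: sep = ""
    else
      let after := PySem.List.slice rest (some (i + 8)) none
      let j := PySem.Chars.find after "</figure>".toList
      if j = -1 then rest        -- second partition found no separator
      else
        PySem.List.slice rest none (some i) ++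
          pv_go ("<figure".toList ++ fid.toList ++ ">".toList
                  ++ PySem.List.slice after (some (j + 9)) none) ids

def replace_figures_in_sequence_py_alt (content : String) (figures : List (List (String × String))) : String :=
  String.ofList (pv_go content.toList (pv_ids figures))

-- ===== PRECONDITION & SPEC =====
def Spec_replace_figures_in_sequence_py (content : String) (figures : List (List (String × String))) (out : String) : Prop := out = replace_figures_in_sequence_py_alt content figures
instance (content : String) (figures : List (List (String × String))) (out : String) : Decidable (Spec_replace_figures_in_sequence_py content figures out) := by unfold Spec_replace_figures_in_sequence_py; infer_instance

-- ===== CLAIM =====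
def Claim_equal_replace_figures_in_sequence_py : Prop := ∀ (content : String) (figures : List (List (String × String))), Dom_replace_figures_in_sequence_py content figures → Spec_replace_figures_in_sequence_py content figures (replace_figures_in_sequence_py content figures)

-- ===== LEMMAS AND PROOFS =====

-- find points at the (unique) first occurrence
lemma pv_find_eq (s sub : List Char) (n : Nat) (h1 : sub <+: s.drop n)
    (h2 : ∀ i < n, ¬ sub <+: s.drop i) : PySem.Chars.find s sub = (n : Int) := by
  have hinf : sub <:+: s := by
    obtain ⟨r, hr⟩ := h1
    refine ⟨s.take n, r, ?_⟩
    rw [List.append_assoc, hr, List.take_append_drop]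
  have hnn : 0 ≤ PySem.Chars.find s sub := (PySem.Chars.find_nonneg_iff s sub).mpr hinf
  obtain ⟨hp, hmin⟩ := PySem.Chars.find_spec hnn
  have hm : (PySem.Chars.find s sub).toNat = n := by
    rcases Nat.lt_trichotomy (PySem.Chars.find s sub).toNat n with h | h | h
    · exact absurd hp (h2 _ h)
    · exact h
    · exact absurd h1 (hmin _ h)
  omega

-- a window entirely inside a shared prefix region sees the same characters
lemma pv_prefix_take (pat s t : List Char) (i n : Nat) (hle : i + pat.length ≤ n)
    (h : s.take n = t.take n) : (pat <+: s.drop i) ↔ (pat <+: t.drop i) := by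
  have key : ∀ u : List Char, u.take n = s.take n →
      (u.drop i).take pat.length = ((s.take n).drop i).take pat.length := by
    intro u hu
    rw [← hu]
    rw [List.drop_take]
    rw [List.take_take]
    congr 1
    omega
  rw [List.prefix_iff_eq_take, List.prefix_iff_eq_take, key s rfl, key t h.symm]

-- no occurrence of "<figure>" can straddle into a segment starting with '<'
lemma pv_no_straddle (u w : List Char) (i : Nat) (h1 : i < u.length) (h2 : u.length < i + 8) :
    ¬ ("<figure>".toList <+: (u ++ '<' :: w).drop i) := by
  intro h
  have hlen : ("<figure>".toList).length = 8 := by decide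
  obtain ⟨d, hd⟩ : ∃ d, u.length - i = d := ⟨_, rfl⟩
  have hdlt : d < ("<figure>".toList).length := by omega
  have hgl2 : ("<figure>".toList)[d]'hdlt = '<' := by
    rw [h.getElem hdlt, List.getElem_drop]
    have hix : i + d = u.length := by omega
    simp only [hix]
    rw [List.getElem_append_right (le_refl _)]
    simp
  have hq : ("<figure>".toList)[d]? = some '<' := by
    rw [List.getElem?_eq_getElem hdlt, hgl2]
  have hd1 : 1 ≤ d := by omega
  have hd2 : d < 8 := by omega
  interval_cases d <;> revert hq <;> decide

-- the drop / take of an append past the first part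
lemma pv_drop_append (acc rest : List Char) (m : Nat) :
    (acc ++ rest).drop (acc.length + m) = rest.drop m := by
  rw [List.drop_append]
  simp [List.drop_eq_nil_of_le]

lemma pv_take_append (acc rest : List Char) (m : Nat) :
    (acc ++ rest).take (acc.length + m) = acc ++ rest.take m := by
  rw [List.take_append]
  simp

-- "</figure>" cannot begin inside the "<figure>" tag itself
lemma pv_no_close_in_tag (w : List Char) (d : Nat) (hd : d < 8) :
    ¬ ("</figure>".toList <+: ("<figure>".toList ++ w).drop d) := by
  intro h
  have hk9 : (if d = 0 then 1 else 0) < ("</figure>".toList).length := by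
    split <;> decide
  have hdk : d + (if d = 0 then 1 else 0) < ("<figure>".toList).length := by
    have : ("<figure>".toList).length = 8 := by decide
    rw [this]; split <;> omega
  have hgl : ("</figure>".toList)[if d = 0 then 1 else 0]'hk9
      = ("<figure>".toList)[d + (if d = 0 then 1 else 0)]'hdk := by
    rw [h.getElem hk9, List.getElem_drop]
    rw [List.getElem_append_left]
  have hq : ("</figure>".toList)[if d = 0 then 1 else 0]?
      = ("<figure>".toList)[d + (if d = 0 then 1 else 0)]? := by
    rw [List.getElem?_eq_getElem hk9, hgl, List.getElem?_eq_getElem]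
  revert hq
  by_cases h0 : d = 0
  · subst h0; decide
  · rw [if_neg h0]
    have h1 : 1 ≤ d := Nat.one_le_iff_ne_zero.mpr h0
    interval_cases d <;> decide

-- searching "</figure>" past a leading "<figure>" tag shifts the result by 8
lemma pv_close_shift (w : List Char) :
    PySem.Chars.find ("<figure>".toList ++ w) "</figure>".toList =
      if PySem.Chars.find w "</figure>".toList = -1 then -1
      else 8 + PySem.Chars.find w "</figure>".toList := by
  have htlen : ("<figure>".toList).length = 8 := by decide
  by_cases hm : PySem.Chars.find w "</figure>".toList = -1
  · rw [if_pos hm, PySem.Chars.find_eq_neg_one_iff]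
    intro hinf
    obtain ⟨j, hj⟩ := (PySem.Chars.exists_prefix_drop_iff_isIn _ _).mpr
      ((PySem.Chars.isIn_iff_infix _ _).mpr hinf)
    by_cases hj8 : j < 8
    · exact pv_no_close_in_tag w j hj8 hj
    · have hj' : "</figure>".toList <+: w.drop (j - 8) := by
        have : j = ("<figure>".toList).length + (j - 8) := by omega
        rw [this, pv_drop_append] at hj
        exact hj
      have : PySem.Chars.find w "</figure>".toList ≠ -1 := by
        rw [PySem.Chars.find_ne_neg_one_iff]
        exact (PySem.Chars.isIn_iff_infix _ _).mp
          ((PySem.Chars.exists_prefix_drop_iff_isIn _ _).mp ⟨_, hj'⟩)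
      exact absurd hm this
  · have hm0 : 0 ≤ PySem.Chars.find w "</figure>".toList := by
      have := PySem.Chars.neg_one_le_find w "</figure>".toList
      omega
    set mN := (PySem.Chars.find w "</figure>".toList).toNat with hmN
    obtain ⟨hp, hmin⟩ := PySem.Chars.find_spec hm0
    have hfind : PySem.Chars.find ("<figure>".toList ++ w) "</figure>".toList = ((8 + mN : Nat) : Int) := by
      apply pv_find_eq
      · have : 8 + mN = ("<figure>".toList).length + mN := by omega
        rw [this, pv_drop_append]
        exact hp
      · intro i hi
        by_cases hi8 : i < 8
        · exact pv_no_close_in_tag w i hi8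
        · have : i = ("<figure>".toList).length + (i - 8) := by omega
          rw [this, pv_drop_append]
          exact hmin _ (by omega)
    rw [hfind, if_neg hm]
    omega

-- main loop invariant: A on acc ++ rest, where no "<figure>" occurrence starts
-- inside acc, equals acc ++ B's recursion on rest
lemma pv_loop_eq (figs : List (List (String × String))) :
    ∀ (acc rest : List Char),
    (∀ i < acc.length, ¬ ("<figure>".toList <+: (acc ++ rest).drop i)) →
    replace_figures_in_sequence_py_loop (acc ++ rest) figs =
      acc ++ pv_go rest (pv_ids figs) := by
  induction figs with
  | nil =>
    intro acc rest _
    simp [replace_figures_in_sequence_py_loop, pv_ids, pv_go]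
  | cons fig figs ih =>
    intro acc rest hinv
    set L := acc.length with hL
    have hids : pv_ids (fig :: figs) =
        (match (PySem.Dict.mk fig).get? "id" with
          | none => pv_ids figs
          | some i => if i = "" then pv_ids figs else i :: pv_ids figs) := by
      simp only [pv_ids, List.filterMap_cons]
      cases hg : (PySem.Dict.mk fig).get? "id" with
      | none => simp
      | some i => by_cases hi : i = "" <;> simp [hi]
    simp only [replace_figures_in_sequence_py_loop]
    cases hg : (PySem.Dict.mk fig).get? "id" with
    | none =>
      rw [hids, hg]
      simp only [hg, Option.getD_none, if_pos rfl]
      exact ih acc rest hinv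
    | some id =>
      rw [hids, hg]
      by_cases hid : id = ""
      · simp only [hg, Option.getD_some, if_pos hid, hid, if_pos rfl]
        exact ih acc rest hinv
      · simp only [hg, Option.getD_some, if_neg hid]
        simp only [pv_go]
        by_cases hs : PySem.Chars.find rest "<figure>".toList = -1
        · -- no match in rest ⇒ no match in acc ++ rest either
          have hA : PySem.Chars.find (acc ++ rest) "<figure>".toList = -1 := by
            rw [PySem.Chars.find_eq_neg_one_iff]
            intro hinf
            obtain ⟨j, hj⟩ := (PySem.Chars.exists_prefix_drop_iff_isIn _ _).mpr
              ((PySem.Chars.isIn_iff_infix _ _).mpr hinf)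
            by_cases hjL : j < L
            · exact hinv j hjL hj
            · have hj' : "<figure>".toList <+: rest.drop (j - L) := by
                have : j = L + (j - L) := by omega
                rw [this, pv_drop_append] at hj
                exact hj
              have : PySem.Chars.find rest "<figure>".toList ≠ -1 := by
                rw [PySem.Chars.find_ne_neg_one_iff]
                exact (PySem.Chars.isIn_iff_infix _ _).mp
                  ((PySem.Chars.exists_prefix_drop_iff_isIn _ _).mp ⟨_, hj'⟩)
              exact this hs
          rw [if_pos hs, if_pos hA]
        · -- a match at sN in rest ⇒ A's match at L + sN
          have hs0 : 0 ≤ PySem.Chars.find rest "<figure>".toList := by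
            have := PySem.Chars.neg_one_le_find rest "<figure>".toList
            omega
          set sN := (PySem.Chars.find rest "<figure>".toList).toNat with hsN
          have hsval : PySem.Chars.find rest "<figure>".toList = (sN : Int) := by omega
          obtain ⟨hp, hmin⟩ := PySem.Chars.find_spec hs0
          have hs8 : sN + 8 ≤ rest.length := by
            have hd := hp.length_le
            have h8 : ("<figure>".toList).length = 8 := by decide
            rw [h8, List.length_drop] at hd
            omega
          have hsle : sN ≤ rest.length := by omega
          have hA : PySem.Chars.find (acc ++ rest) "<figure>".toList = ((L + sN : Nat) : Int) := by
            apply pv_find_eq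
            · rw [pv_drop_append]; exact hp
            · intro i hi
              by_cases hiL : i < L
              · exact hinv i hiL
              · have : i = L + (i - L) := by omega
                rw [this, pv_drop_append]
                exact hmin _ (by omega)
          have hAne : ¬ PySem.Chars.find (acc ++ rest) "<figure>".toList = -1 := by
            rw [hA]; omega
          rw [if_neg hs, if_neg hAne, hA, hsval]
          -- rest.drop sN starts with the "<figure>" tag
          obtain ⟨t, ht⟩ := hp
          have htail : rest.drop (sN + 8) = t := by
            have h1 : (rest.drop sN).drop 8 = rest.drop (sN + 8) := by
              rw [List.drop_drop]
              try rw [Nat.add_comm]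
            rw [← h1, ← ht]
            simp
          have hsplit : rest.drop sN = "<figure>".toList ++ rest.drop (sN + 8) := by
            rw [htail]; exact ht.symm
          -- B's `after`
          have hafter : PySem.List.slice rest (some ((sN : Int) + 8)) none = rest.drop (sN + 8) := by
            have h2 : ((sN : Int) + 8).toNat = sN + 8 := by omega
            rw [PySem.List.slice_from _ (by omega), h2]
          rw [hafter]
          -- A's findFrom
          have hkA : L + sN ≤ (acc ++ rest).length := by
            rw [List.length_append]; omega
          have hFA := PySem.Chars.findFrom_natCast (acc ++ rest) "</figure>".toList (L + sN) hkA
          rw [pv_drop_append, hsplit, pv_close_shift] at hFA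
          set mB := PySem.Chars.find (rest.drop (sN + 8)) "</figure>".toList with hmB
          by_cases hc : mB = -1
          · rw [if_pos hc, if_pos rfl] at hFA
            rw [hFA]
            simp [hc]
          · have hc0 : 0 ≤ mB := by
              have := PySem.Chars.neg_one_le_find (rest.drop (sN + 8)) "</figure>".toList
              omega
            set mN := mB.toNat with hmN
            have hmval : mB = (mN : Int) := by omega
            have h8ne : ¬ ((8 : Int) + mB = -1) := by omega
            have hne1 : ¬ ((L + sN : Nat) : Int) + (8 + mB) = -1 := by omega
            rw [if_neg hc, if_neg h8ne] at hFA
            rw [hFA, if_neg hne1, if_neg hc]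
            -- compute A's slices
            have hsliceA1 : PySem.List.slice (acc ++ rest) none (some ((L + sN : Nat) : Int)) =
                acc ++ rest.take sN := by
              rw [PySem.List.slice_to _ (by omega)]
              rw [Int.toNat_natCast, pv_take_append]
            have hsliceA2 : PySem.List.slice (acc ++ rest) (some (((L + sN : Nat) : Int) + (8 + mB) + 9)) none =
                rest.drop (sN + 8 + mN + 9) := by
              rw [PySem.List.slice_from _ (by omega)]
              have : (((L + sN : Nat) : Int) + (8 + mB) + 9).toNat = L + (sN + 8 + mN + 9) := by omega
              rw [this, pv_drop_append]
            have hsliceB1 : PySem.List.slice rest none (some ((sN : Nat) : Int)) = rest.take sN := by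
              rw [PySem.List.slice_to _ (by omega), Int.toNat_natCast]
            have hsliceB2 : PySem.List.slice (rest.drop (sN + 8)) (some (mB + 9)) none =
                rest.drop (sN + 8 + mN + 9) := by
              have h3 : (mB + 9).toNat = mN + 9 := by omega
              have h4 : sN + 8 + (mN + 9) = sN + 8 + mN + 9 := by omega
              rw [PySem.List.slice_from _ (by omega), h3, List.drop_drop, h4]
            rw [hsliceA1, hsliceA2, hsliceB1, hsliceB2]
            -- both sides now recurse / assemble over the same pieces
            set idc := id.toList with hidc
            set tail := rest.drop (sN + 8 + mN + 9) with htl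
            have hstate : acc ++ rest.take sN ++ ("<figure".toList ++ idc ++ ">".toList) ++ tail =
                (acc ++ rest.take sN) ++
                  (("<figure".toList ++ idc ++ ">".toList ++ tail)) := by
              simp
            rw [hstate]
            have hrec := ih (acc ++ rest.take sN) ("<figure".toList ++ idc ++ ">".toList ++ tail) ?_
            · rw [hrec, List.append_assoc]
            -- the new invariant
            intro i hi
            have hlen' : (acc ++ rest.take sN).length = L + sN := by
              rw [List.length_append, List.length_take]
              omega
            rw [hlen'] at hi
            by_cases hwin : i + 8 ≤ L + sN
            · -- window inside the unchanged prefix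
              have hshare : ((acc ++ rest.take sN) ++
                  ("<figure".toList ++ idc ++ ">".toList ++ tail)).take (L + sN) =
                  (acc ++ rest).take (L + sN) := by
                conv_lhs => rw [← hlen']
                rw [List.take_left, hL]
                exact (pv_take_append acc rest sN).symm
              have := pv_prefix_take "<figure>".toList _ (acc ++ rest) i (L + sN)
                (by rw [(by decide : ("<figure>".toList).length = 8)]; omega) hshare
              rw [this]
              by_cases hiL : i < L
              · exact hinv i hiL
              · have heq : i = L + (i - L) := by omega
                rw [heq, pv_drop_append]
                exact hmin _ (by omega)
            · -- window straddles into the inserted tag, which starts with '<'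
              have h2 : (acc ++ rest.take sN).length < i + 8 := by omega
              have h1 : i < (acc ++ rest.take sN).length := by omega
              intro hpref
              apply pv_no_straddle (acc ++ rest.take sN)
                ("figure".toList ++ idc ++ ">".toList ++ tail) i h1 h2
              have htag : "<figure".toList ++ idc ++ ">".toList ++ tail =
                  '<' :: ("figure".toList ++ idc ++ ">".toList ++ tail) := by
                simp
              rw [htag] at hpref
              exact hpref

-- ===== VERDICT (by name: the statement is the Claim_ definition above) =====
theorem replace_figures_in_sequence_py_spec : Claim_equal_replace_figures_in_sequence_py := by
  intro content figures _
  unfold Spec_replace_figures_in_sequence_py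
  unfold replace_figures_in_sequence_py replace_figures_in_sequence_py_alt
  have := pv_loop_eq figures [] content.toList (by intro i hi; simp at hi)
  simp only [List.nil_append] at this
  rw [this]
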